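-- pv_equiv track=rewrite | github.com/Shengpy/Cryptarithmetic_Problem_in_AI | SOURCE/source.py | replaceZero
-- ===== SOURCE A (Python) =====
-- operator=['+','-','*']
--
-- def replaceZero(input_string):
--   left_x=[]
--   operator_input=[]
--   ls=''
--   for i in range(len(input_string)):
--     if(input_string[i] in operator):
--       left_x.append(ls)
--       operator_input.append(input_string[i])
--       ls=''
--       continue
--     ls+=input_string[i]
--     if(i==len(input_string)-1):
--       left_x.append(ls)
--   result=''
--   for a in left_x:
--     if(len(a)>1):
--       a=list(a)
--       if (a[0]=='0'):
--         a[0]=''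
--       for i in range(len(a)-1):
--         if(a[i] in operator and a[i+1]=='0'):
--           a[i+1]=''
--       a=''.join(a)
--     result+=a
--     if(len(operator_input)>0):
--       result+=operator_input[0]
--       operator_input.pop(0)
--   return result
-- ===== SOURCE B (Python) =====
-- def replaceZero(input_string):
--     ops = ('+', '-', '*')
--     s = input_string
--     out = []
--     start = True
--     for i in range(len(s)):
--         c = s[i]
--         if c in ops:
--             out.append(c)
--             start = True
--         else:
--             if not (start and c == '0' and i + 1 < len(s) and s[i + 1] not in ops):
--                 out.append(c)
--             start = False
--     return ''.join(out)
-- ===== Notes on version B (the rewrite author's own statement) =====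
-- stated objective: faster
-- what changed: Replaced A's two-phase tokenize-into-lists-then-strip-and-reassemble (per-token list(a) surgery, repeated string concatenation and operator pop(0)) by one left-to-right pass keeping an operand-start flag and a one-character lookahead, emitting characters directly.
import Mathlib
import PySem

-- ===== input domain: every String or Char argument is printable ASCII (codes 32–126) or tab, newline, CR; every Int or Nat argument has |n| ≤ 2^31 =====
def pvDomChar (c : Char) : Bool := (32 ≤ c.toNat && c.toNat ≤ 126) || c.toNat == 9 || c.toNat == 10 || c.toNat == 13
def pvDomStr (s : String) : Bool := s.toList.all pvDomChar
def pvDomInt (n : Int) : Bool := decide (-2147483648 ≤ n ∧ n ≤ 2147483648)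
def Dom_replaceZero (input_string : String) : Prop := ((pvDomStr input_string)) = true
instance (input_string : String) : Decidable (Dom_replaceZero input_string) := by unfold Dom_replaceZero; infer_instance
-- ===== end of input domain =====

-- B replaces A's tokenize-strip-reassemble with a single left-to-right pass (operand-start
-- flag + one-character lookahead); equal return value, measured constant-factor faster.

-- ===== PORT A =====
-- the module constant `operator`
def pvOps : List Char := ['+', '-', '*']

-- A's first loop: split on operators into (left_x, operator_input); `ls` accumulates the
-- current token; the `cs = []` branch is the `i == len(input_string)-1` append of the final ls
def pvTokA : List Char → List Char → List (List Char) × List Char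
  | [], _ => ([], [])
  | c :: cs, ls =>
    if c ∈ pvOps then
      let r := pvTokA cs []
      (ls :: r.1, c :: r.2)
    else if cs = [] then ([ls ++ [c]], [])
    else pvTokA cs (ls ++ [c])

-- `operator`'s members as one-character strings (the cells of Python's `a = list(a)`)
def pvOpsS : List (List Char) := [['+'], ['-'], ['*']]

-- body of A's second loop on one token a; a cell [c] models Python's 1-char string, [] models ''
def pvStripA (a : List Char) : List Char :=
  if a.length > 1 then
    let l0 : List (List Char) := a.map (fun c => [c])
    let l1 := if l0.getD 0 [] = ['0'] then l0.set 0 [] else l0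
    let l2 := (List.range (a.length - 1)).foldl
      (fun l i => if l.getD i [] ∈ pvOpsS ∧ l.getD (i + 1) [] = ['0'] then l.set (i + 1) [] else l) l1
    l2.flatten
  else a

-- A's second loop: concatenate stripped tokens, popping one operator after each token
def pvJoinA : List (List Char) → List Char → List Char
  | [], _ => []
  | a :: rest, ops' =>
    match ops' with
    | [] => pvStripA a ++ pvJoinA rest []
    | o :: os => pvStripA a ++ o :: pvJoinA rest os

def replaceZero (input_string : String) : String :=
  let r := pvTokA input_string.toList []
  String.ofList (pvJoinA r.1 r.2)

-- ===== PORT B =====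
-- B's lookahead test `i + 1 < len(s) and s[i+1] not in ops`
def pvNextOk : List Char → Bool
  | [] => false
  | d :: _ => decide (d ∉ pvOps)

-- B's single pass; `start` is the operand-start flag
def pvGoB : List Char → Bool → List Char
  | [], _ => []
  | c :: cs, start =>
    if c ∈ pvOps then c :: pvGoB cs true
    else if start = true ∧ c = '0' ∧ pvNextOk cs = true then pvGoB cs false
    else c :: pvGoB cs false

def replaceZero_alt (input_string : String) : String :=
  String.ofList (pvGoB input_string.toList true)

-- ===== PRECONDITION & SPEC =====
def Spec_replaceZero (input_string : String) (out : String) : Prop := out = replaceZero_alt input_string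
instance (input_string : String) (out : String) : Decidable (Spec_replaceZero input_string out) := by unfold Spec_replaceZero; infer_instance

-- ===== CLAIM (what is proved, stated in full; the proofs are below) =====
def Claim_equal_replaceZero : Prop := ∀ (input_string : String), Dom_replaceZero input_string → Spec_replaceZero input_string (replaceZero input_string)

-- ===== LEMMAS AND PROOFS =====

-- simple leading-zero strip: what pvStripA does on an operator-free token
def pvStrip' : List Char → List Char
  | c :: d :: rest => if c = '0' then d :: rest else c :: d :: rest
  | a => a

theorem pvGoB_copy (t r : List Char) (h : ∀ c ∈ t, c ∉ pvOps) :
    pvGoB (t ++ r) false = t ++ pvGoB r false := by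
  induction t with
  | nil => rfl
  | cons c cs ih =>
    have hc : c ∉ pvOps := h c (by simp)
    simp [pvGoB, hc, ih (fun x hx => h x (by simp [hx]))]

theorem pvGoB_token_op (t : List Char) (o : Char) (rest : List Char)
    (ht : ∀ c ∈ t, c ∉ pvOps) (ho : o ∈ pvOps) :
    pvGoB (t ++ o :: rest) true = pvStrip' t ++ o :: pvGoB rest true := by
  match t with
  | [] => simp [pvGoB, pvStrip', ho]
  | [c] =>
    have hc : c ∉ pvOps := ht c (by simp)
    simp [pvGoB, pvStrip', hc, ho, pvNextOk]
  | c :: d :: t' =>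
    have hc : c ∉ pvOps := ht c (by simp)
    have hd : d ∉ pvOps := ht d (by simp)
    have ht' : ∀ x ∈ t', x ∉ pvOps := fun x hx => ht x (by simp [hx])
    have hcont : pvGoB (t' ++ o :: rest) false = t' ++ o :: pvGoB rest true := by
      rw [pvGoB_copy t' (o :: rest) ht']; simp [pvGoB, ho]
    by_cases h0 : c = '0'
    · subst h0
      simp [pvGoB, pvStrip', hc, hd, pvNextOk, hcont]
    · simp [pvGoB, pvStrip', hc, hd, h0, pvNextOk, hcont]

theorem pvGoB_token_end (t : List Char) (ht : ∀ c ∈ t, c ∉ pvOps) :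
    pvGoB t true = pvStrip' t := by
  match t with
  | [] => rfl
  | [c] =>
    have hc : c ∉ pvOps := ht c (by simp)
    simp [pvGoB, pvStrip', hc, pvNextOk]
  | c :: d :: t' =>
    have hc : c ∉ pvOps := ht c (by simp)
    have hd : d ∉ pvOps := ht d (by simp)
    have ht' : ∀ x ∈ t', x ∉ pvOps := fun x hx => ht x (by simp [hx])
    have hcont : pvGoB (t' ++ ([] : List Char)) false = t' ++ pvGoB [] false :=
      pvGoB_copy t' [] ht'
    simp [pvGoB] at hcont
    by_cases h0 : c = '0'
    · subst h0
      simp [pvGoB, pvStrip', hc, hd, pvNextOk, hcont]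
    · simp [pvGoB, pvStrip', hc, hd, h0, pvNextOk, hcont]

theorem pvTokA_token_op (t : List Char) (o : Char) (rest ls : List Char)
    (ht : ∀ c ∈ t, c ∉ pvOps) (ho : o ∈ pvOps) :
    pvTokA (t ++ o :: rest) ls = ((ls ++ t) :: (pvTokA rest []).1, o :: (pvTokA rest []).2) := by
  induction t generalizing ls with
  | nil => simp [pvTokA, ho]
  | cons c t' ih =>
    have hc : c ∉ pvOps := ht c (by simp)
    have ht' : ∀ x ∈ t', x ∉ pvOps := fun x hx => ht x (by simp [hx])
    simp [pvTokA, hc, ih (ls ++ [c]) ht']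

theorem pvTokA_token_end (t ls : List Char) (ht : ∀ c ∈ t, c ∉ pvOps) (hne : t ≠ []) :
    pvTokA t ls = ([ls ++ t], []) := by
  induction t generalizing ls with
  | nil => exact absurd rfl hne
  | cons c t' ih =>
    have hc : c ∉ pvOps := ht c (by simp)
    have ht' : ∀ x ∈ t', x ∉ pvOps := fun x hx => ht x (by simp [hx])
    cases t' with
    | nil => simp [pvTokA, hc]
    | cons d t'' =>
      rw [show pvTokA (c :: d :: t'') ls = pvTokA (d :: t'') (ls ++ [c]) by simp [pvTokA, hc],
        ih (ls ++ [c]) ht' (by simp)]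
      simp

theorem pvFlatten_singleton (xs : List Char) : (xs.map (fun c => [c])).flatten = xs := by
  induction xs with
  | nil => rfl
  | cons c cs ih => simp [ih]

theorem pvFold_noop (idxs : List Nat) (L : List (List Char)) (hL : ∀ x ∈ L, x ∉ pvOpsS) :
    idxs.foldl (fun l i => if l.getD i [] ∈ pvOpsS ∧ l.getD (i + 1) [] = ['0'] then l.set (i + 1) [] else l) L = L := by
  induction idxs with
  | nil => rfl
  | cons i is ih =>
    have hgd : L.getD i [] ∉ pvOpsS := by
      rcases Nat.lt_or_ge i L.length with h | h
      · rw [List.getD_eq_getElem L [] h]; exact hL _ (List.getElem_mem h)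
      · rw [List.getD_eq_default L [] h]; decide
    have hif : (if L.getD i [] ∈ pvOpsS ∧ L.getD (i + 1) [] = ['0'] then L.set (i + 1) [] else L) = L :=
      if_neg (fun hcon => hgd hcon.1)
    simp only [List.foldl_cons, hif]
    exact ih

theorem pvSing_notOpsS (x : Char) (hx : x ∉ pvOps) : [x] ∉ pvOpsS := by
  intro hmem
  simp [pvOpsS] at hmem
  rcases hmem with h | h | h <;> (subst h; exact hx (by decide))

theorem pvStripA_opFree (a : List Char) (h : ∀ c ∈ a, c ∉ pvOps) :
    pvStripA a = pvStrip' a := by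
  match a with
  | [] => rfl
  | [c] => rfl
  | c :: d :: rest =>
    have hmem : ∀ x ∈ (c :: d :: rest).map (fun c => [c]), x ∉ pvOpsS := by
      intro x hx
      rcases List.mem_map.mp hx with ⟨y, hy, rfl⟩
      exact pvSing_notOpsS y (h y hy)
    show pvStripA (c :: d :: rest) = pvStrip' (c :: d :: rest)
    by_cases h0 : c = '0'
    · subst h0
      have hL : ∀ x ∈ ([] :: (d :: rest).map (fun c => [c]) : List (List Char)), x ∉ pvOpsS := by
        intro x hx
        rcases List.mem_cons.mp hx with rfl | hx
        · decide
        · exact hmem x (by simp at hx ⊢; tauto)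
      simp only [pvStripA]
      rw [if_pos (by simp)]
      rw [show ((('0' :: d :: rest).map (fun c => [c])).getD 0 []) = ['0'] by simp [List.getD]]
      rw [if_pos rfl]
      rw [show (((('0' :: d :: rest).map (fun c => [c]))).set 0 []) = [] :: (d :: rest).map (fun c => [c]) by simp]
      rw [pvFold_noop _ _ hL]
      simp [pvStrip', pvFlatten_singleton]
    · simp only [pvStripA]
      rw [if_pos (by simp)]
      rw [if_neg (show ¬ (((c :: d :: rest).map (fun c => [c])).getD 0 []) = ['0'] by simp [List.getD, h0])]
      rw [pvFold_noop _ _ hmem]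
      simp [pvStrip', h0, pvFlatten_singleton]

theorem pvSplitFirst (cs : List Char) :
    (∀ c ∈ cs, c ∉ pvOps) ∨
      ∃ t o rest, cs = t ++ o :: rest ∧ (∀ c ∈ t, c ∉ pvOps) ∧ o ∈ pvOps := by
  induction cs with
  | nil => exact Or.inl (by simp)
  | cons c cs ih =>
    by_cases hc : c ∈ pvOps
    · exact Or.inr ⟨[], c, cs, by simp, by simp, hc⟩
    · rcases ih with h | ⟨t, o, rest, rfl, ht, ho⟩
      · refine Or.inl ?_
        intro x hx
        rcases List.mem_cons.mp hx with rfl | hx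
        · exact hc
        · exact h x hx
      · refine Or.inr ⟨c :: t, o, rest, rfl, ?_, ho⟩
        intro x hx
        rcases List.mem_cons.mp hx with rfl | hx
        · exact hc
        · exact ht x hx

theorem pvMain (cs : List Char) :
    pvJoinA (pvTokA cs []).1 (pvTokA cs []).2 = pvGoB cs true := by
  induction hn : cs.length using Nat.strong_induction_on generalizing cs with
  | _ n ih =>
    rcases pvSplitFirst cs with hfree | ⟨t, o, rest, rfl, ht, ho⟩
    · cases cs with
      | nil => rfl
      | cons c cs' =>
        rw [pvTokA_token_end _ [] hfree (by simp)]
        show pvStripA (c :: cs') ++ pvJoinA [] [] = _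
        rw [pvStripA_opFree _ hfree, pvGoB_token_end _ hfree]
        simp [pvJoinA]
    · rw [pvTokA_token_op t o rest [] ht ho]
      show pvStripA t ++ o :: pvJoinA (pvTokA rest []).1 (pvTokA rest []).2 = _
      rw [ih rest.length (by subst hn; simp; omega) rest rfl]
      rw [pvStripA_opFree t ht, pvGoB_token_op t o rest ht ho]

-- ===== VERDICT (by name: the statement is the Claim_ definition above) =====
theorem replaceZero_spec : Claim_equal_replaceZero := by
  intro s _
  show replaceZero s = replaceZero_alt s
  unfold replaceZero replaceZero_alt
  simp only []
  rw [pvMain]
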